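-- pv_equiv track=rewrite | github.com/sbeleidy/sarBehaviorGen | story_gen/convert_action_scripts_to_robot_expressions.py | break_action_list_into_simultaneous_action_lists
-- ===== SOURCE A (Python) =====
-- def break_action_list_into_simultaneous_action_lists(action_list):
--     """Split action list into expressions broken up by pauses
--
--     Args:
--         action_list (Action[]): A list of Actions
--
--     Returns:
--         Action[]: A list of Actions that would be expressed simultaneously
--     """
--     simultaneous_action_lists = []
--     chunk = []
--     one_text = False
--     for action in action_list:
--         if one_text and action["name"] == "SayText":
--             one_text = False
--             if len(chunk) > 0:
--                 simultaneous_action_lists.append(chunk)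
--             chunk = []
--         if action["name"] == "SayText":
--             one_text = True
--             chunk.append(action)
--         elif action["name"] != "Pause":
--             chunk.append(action)
--
--     if len(chunk) > 0:
--         simultaneous_action_lists.append(chunk)
--
--     return simultaneous_action_lists
-- ===== SOURCE B (Python) =====
-- def break_action_list_into_simultaneous_action_lists(action_list):
--     """Split action list into expressions broken up by pauses (reversed-pass rebuild)."""
--     chunks = []
--     chunk = []
--     for action in reversed(action_list):
--         if action["name"] == "Pause":
--             continue
--         chunk = [action] + chunk
--         if action["name"] == "SayText":
--             chunks = [chunk] + chunks
--             chunk = []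
--     # leftover = the leading non-SayText prefix: attach it to the first chunk
--     if not chunk:
--         return chunks
--     if not chunks:
--         return [chunk]
--     return [chunk + chunks[0]] + chunks[1:]
-- ===== Notes on version B (the rewrite author's own statement) =====
-- stated objective: alternative
-- what changed: B traverses the list in reverse, closing a chunk at every SayText it meets (building the output back-to-front) and finally merging the leading non-SayText prefix into the first chunk, instead of A's forward pass driven by a one_text flag.
import Mathlib
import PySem

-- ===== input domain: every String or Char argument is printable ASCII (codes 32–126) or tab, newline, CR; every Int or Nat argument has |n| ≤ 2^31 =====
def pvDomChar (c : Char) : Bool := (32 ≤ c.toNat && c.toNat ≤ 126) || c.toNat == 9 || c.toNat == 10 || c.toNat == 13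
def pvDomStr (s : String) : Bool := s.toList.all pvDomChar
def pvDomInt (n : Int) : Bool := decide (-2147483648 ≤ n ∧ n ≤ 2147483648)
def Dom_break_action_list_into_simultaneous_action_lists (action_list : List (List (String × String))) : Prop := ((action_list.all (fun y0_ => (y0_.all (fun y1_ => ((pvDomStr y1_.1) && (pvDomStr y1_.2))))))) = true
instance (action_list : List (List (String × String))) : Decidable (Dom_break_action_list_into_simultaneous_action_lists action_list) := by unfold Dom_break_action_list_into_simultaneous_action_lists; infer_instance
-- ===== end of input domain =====

-- B replaces A's forward flag-driven pass by a reversed pass that closes a chunk at each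
-- SayText and finally merges the leading non-SayText prefix into the first chunk (alternative
-- decomposition, same O(n) cost); equivalence is proved on inputs whose actions all carry a "name" key.


-- an action is a dict as association list; action["name"] = first value under key "name"
-- (Pre_ guarantees the key is present, so the .getD "" default is never consulted there)
def pvName (a : List (String × String)) : String :=
  ((a.find? (fun p => p.1 == "name")).map Prod.snd).getD ""

-- ===== PORT A =====
-- one iteration of A's for-loop over state (simultaneous_action_lists, chunk, one_text)
def pvStepA (s : List (List (List (String × String))) × List (List (String × String)) × Bool)
    (action : List (String × String)) :
    List (List (List (String × String))) × List (List (String × String)) × Bool :=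
  let t := if s.2.2 && (pvName action == "SayText") then
             ((if s.2.1.length > 0 then s.1 ++ [s.2.1] else s.1), ([] : List (List (String × String))), false)
           else s
  if pvName action == "SayText" then (t.1, t.2.1 ++ [action], true)
  else if pvName action != "Pause" then (t.1, t.2.1 ++ [action], t.2.2)
  else t

-- the trailing 'if len(chunk) > 0: append' of A
def pvFinishA (r : List (List (List (String × String))) × List (List (String × String)) × Bool) :
    List (List (List (String × String))) :=
  if r.2.1.length > 0 then r.1 ++ [r.2.1] else r.1

def break_action_list_into_simultaneous_action_lists (action_list : List (List (String × String))) : List (List (List (String × String))) :=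
  pvFinishA (action_list.foldl pvStepA ([], [], false))

-- ===== PORT B =====
-- one iteration of B's loop over reversed(action_list) = a right fold over action_list
def pvStepB (action : List (String × String))
    (s : List (List (List (String × String))) × List (List (String × String))) :
    List (List (List (String × String))) × List (List (String × String)) :=
  if pvName action == "Pause" then s
  else
    let c := action :: s.2
    if pvName action == "SayText" then (c :: s.1, ([] : List (List (String × String)))) else (s.1, c)

-- B's final merge of the leftover leading prefix into the first chunk
def pvFixup (x : List (List (String × String))) (ch : List (List (List (String × String)))) :
    List (List (List (String × String))) :=
  match x, ch with
  | [], _ => ch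
  | x, [] => [x]
  | x, h :: t => (x ++ h) :: t

def break_action_list_into_simultaneous_action_lists_alt (action_list : List (List (String × String))) : List (List (List (String × String))) :=
  let r := action_list.foldr pvStepB ([], [])
  pvFixup r.2 r.1

-- ===== PRECONDITION & SPEC =====
-- Pre_ excludes exactly the inputs where some action lacks the "name" key: there Python A
-- raises KeyError (returns nothing).
def Pre_break_action_list_into_simultaneous_action_lists (action_list : List (List (String × String))) : Prop :=
  ∀ a ∈ action_list, "name" ∈ a.map Prod.fst
instance (action_list : List (List (String × String))) : Decidable (Pre_break_action_list_into_simultaneous_action_lists action_list) := by unfold Pre_break_action_list_into_simultaneous_action_lists; infer_instance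

def pvWitness_break_action_list_into_simultaneous_action_lists : (List (List (String × String))) :=
  [[("name", "SayText"), ("text", "hi")], [("name", "Pause")], [("name", "LightOn")],
   [("name", "SayText"), ("text", "bye")]]

def Spec_break_action_list_into_simultaneous_action_lists (action_list : List (List (String × String))) (out : List (List (List (String × String)))) : Prop := out = break_action_list_into_simultaneous_action_lists_alt action_list
instance (action_list : List (List (String × String))) (out : List (List (List (String × String)))) : Decidable (Spec_break_action_list_into_simultaneous_action_lists action_list out) := by unfold Spec_break_action_list_into_simultaneous_action_lists; infer_instance

-- ===== CLAIM (what is proved, stated in full; the proofs are below) =====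
def Claim_equal_break_action_list_into_simultaneous_action_lists : Prop := ∀ (action_list : List (List (String × String))), Dom_break_action_list_into_simultaneous_action_lists action_list → Pre_break_action_list_into_simultaneous_action_lists action_list → Spec_break_action_list_into_simultaneous_action_lists action_list (break_action_list_into_simultaneous_action_lists action_list)

-- ===== LEMMAS AND PROOFS =====

-- both loop bodies ignore Pause actions, so both folds see only the Pause-free sublist
theorem pvStepA_pause (s : List (List (List (String × String))) × List (List (String × String)) × Bool)
    (a : List (String × String)) (h : pvName a = "Pause") : pvStepA s a = s := by
  simp [pvStepA, h]

theorem pvStepB_pause (s : List (List (List (String × String))) × List (List (String × String)))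
    (a : List (String × String)) (h : pvName a = "Pause") : pvStepB a s = s := by
  simp [pvStepB, h]

theorem pvFoldlA_filter (l : List (List (String × String)))
    (s : List (List (List (String × String))) × List (List (String × String)) × Bool) :
    l.foldl pvStepA s = (l.filter (fun a => !(pvName a == "Pause"))).foldl pvStepA s := by
  induction l generalizing s with
  | nil => rfl
  | cons a l ih =>
    by_cases h : pvName a = "Pause"
    · simp [h, pvStepA_pause _ _ h, ih]
    · simp [h, ih]

theorem pvFoldrB_filter (l : List (List (String × String)))
    (s : List (List (List (String × String))) × List (List (String × String))) :
    l.foldr pvStepB s = (l.filter (fun a => !(pvName a == "Pause"))).foldr pvStepB s := by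
  induction l with
  | nil => rfl
  | cons a l ih =>
    by_cases h : pvName a = "Pause"
    · simp [h, ih, pvStepB_pause _ _ h]
    · simp [h, ih]

-- A's accumulator of finished chunks only grows at the front
theorem pvStepA_out (out : List (List (List (String × String))))
    (c : List (List (String × String))) (one : Bool) (a : List (String × String)) :
    pvStepA (out, c, one) a = (out ++ (pvStepA ([], c, one) a).1, (pvStepA ([], c, one) a).2) := by
  simp only [pvStepA]
  split_ifs <;> simp

theorem pvFoldlA_out (l : List (List (String × String)))
    (out : List (List (List (String × String)))) (c : List (List (String × String))) (one : Bool) :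
    l.foldl pvStepA (out, c, one) =
      (out ++ (l.foldl pvStepA ([], c, one)).1, (l.foldl pvStepA ([], c, one)).2) := by
  induction l generalizing out c one with
  | nil => simp
  | cons a l ih =>
    simp only [List.foldl_cons]
    rw [pvStepA_out]
    obtain ⟨e, c', one'⟩ := pvStepA ([], c, one) a
    rw [ih (out ++ e) c' one', ih e c' one']
    simp

theorem pvFinishA_out (out o : List (List (List (String × String))))
    (c : List (List (String × String))) (one : Bool) :
    pvFinishA (out ++ o, c, one) = out ++ pvFinishA (o, c, one) := by
  simp only [pvFinishA]
  split_ifs <;> simp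

theorem pvFixup_cons (x h : List (List (String × String)))
    (t : List (List (List (String × String)))) :
    pvFixup x (h :: t) = (x ++ h) :: t := by
  cases x <;> simp [pvFixup]

-- main invariant, one_text = true: the current chunk is nonempty and absorbs the
-- upcoming non-SayText run, then B's chunks follow
theorem pvMainTrue (l : List (List (String × String)))
    (hp : ∀ a ∈ l, ¬ pvName a = "Pause") (c : List (List (String × String))) (hc : c ≠ []) :
    pvFinishA (l.foldl pvStepA ([], c, true)) =
      (c ++ (l.foldr pvStepB ([], [])).2) :: (l.foldr pvStepB ([], [])).1 := by
  induction l generalizing c with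
  | nil => simp [pvFinishA, List.length_pos_iff, hc]
  | cons a l ih =>
    have hpa : ¬ pvName a = "Pause" := hp a (List.mem_cons_self ..)
    have hpl : ∀ x ∈ l, ¬ pvName x = "Pause" := fun x hx => hp x (List.mem_cons_of_mem _ hx)
    by_cases hs : pvName a = "SayText"
    · have h1 : pvStepA ([], c, true) a = ([c], [a], true) := by
        simp [pvStepA, hs, List.length_pos_iff, hc]
      simp only [List.foldl_cons, List.foldr_cons, h1]
      rw [pvFoldlA_out, pvFinishA_out, ih hpl [a] (by simp)]
      simp [pvStepB, hs]
    · have h1 : pvStepA ([], c, true) a = ([], c ++ [a], true) := by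
        simp [pvStepA, hs, hpa]
      simp only [List.foldl_cons, List.foldr_cons, h1]
      rw [ih hpl (c ++ [a]) (by simp)]
      simp [pvStepB, hs, hpa]

-- main invariant, one_text = false: no SayText seen yet, chunk = c ++ leading prefix
theorem pvMainFalse (l : List (List (String × String)))
    (hp : ∀ a ∈ l, ¬ pvName a = "Pause") (c : List (List (String × String))) :
    pvFinishA (l.foldl pvStepA ([], c, false)) =
      pvFixup (c ++ (l.foldr pvStepB ([], [])).2) (l.foldr pvStepB ([], [])).1 := by
  induction l generalizing c with
  | nil =>
    cases c with
    | nil => simp [pvFinishA, pvFixup]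
    | cons x xs => simp [pvFinishA, pvFixup]
  | cons a l ih =>
    have hpa : ¬ pvName a = "Pause" := hp a (List.mem_cons_self ..)
    have hpl : ∀ x ∈ l, ¬ pvName x = "Pause" := fun x hx => hp x (List.mem_cons_of_mem _ hx)
    by_cases hs : pvName a = "SayText"
    · have h1 : pvStepA ([], c, false) a = ([], c ++ [a], true) := by
        simp [pvStepA, hs]
      simp only [List.foldl_cons, List.foldr_cons, h1]
      rw [pvMainTrue l hpl (c ++ [a]) (by simp)]
      simp [pvStepB, hs, pvFixup_cons]
    · have h1 : pvStepA ([], c, false) a = ([], c ++ [a], false) := by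
        simp [pvStepA, hs, hpa]
      simp only [List.foldl_cons, List.foldr_cons, h1]
      rw [ih hpl (c ++ [a])]
      simp [pvStepB, hs, hpa]

-- ===== VERDICT (by name: the statement is the Claim_ definition above) =====
theorem break_action_list_into_simultaneous_action_lists_spec : Claim_equal_break_action_list_into_simultaneous_action_lists := by
  intro l _ _
  unfold Spec_break_action_list_into_simultaneous_action_lists
  unfold break_action_list_into_simultaneous_action_lists
    break_action_list_into_simultaneous_action_lists_alt
  rw [pvFoldlA_filter, pvFoldrB_filter]
  have hp : ∀ a ∈ l.filter (fun a => !(pvName a == "Pause")), ¬ pvName a = "Pause" := by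
    intro a ha
    simpa using (List.of_mem_filter ha)
  have := pvMainFalse (l.filter (fun a => !(pvName a == "Pause"))) hp []
  simpa using this
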